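-- pv_equiv track=rewrite | github.com/AndrewZumwalt/Palantir | src/palantir/brain/service.py | _is_visual_question
-- ===== SOURCE A (Python) =====
-- def _is_visual_question(text: str) -> bool:
--     """Detect if a question requires looking at the camera feed."""
--     visual_triggers = [
--         "where is", "where are", "where's", "can you see",
--         "do you see", "what am i wearing", "what is he wearing",
--         "what is she wearing", "what color", "how many people",
--         "what's on the", "look at", "show me", "find the",
--         "what does", "look like", "what's in", "is there a",
--         "what am i holding", "what am i doing",
--     ]
--     lower = text.lower()
--     return any(trigger in lower for trigger in visual_triggers)
-- ===== SOURCE B (Python) =====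
-- _VISUAL_TRIGGERS_BY_FIRST = {
--     "w": [
--         "where is", "where are", "where's", "what am i wearing",
--         "what is he wearing", "what is she wearing", "what color",
--         "what's on the", "what does", "what's in", "what am i holding",
--         "what am i doing",
--     ],
--     "c": ["can you see"],
--     "d": ["do you see"],
--     "h": ["how many people"],
--     "l": ["look at", "look like"],
--     "s": ["show me"],
--     "f": ["find the"],
--     "i": ["is there a"],
-- }
--
--
-- def _is_visual_question(text: str) -> bool:
--     """Detect if a question requires looking at the camera feed.
--
--     Single left-to-right scan: at each position, only the triggers whose
--     first character matches are tested with startswith.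
--     """
--     lower = text.lower()
--     for i in range(len(lower)):
--         for trigger in _VISUAL_TRIGGERS_BY_FIRST.get(lower[i], ()):
--             if lower.startswith(trigger, i):
--                 return True
--     return False
-- ===== Notes on version B (the rewrite author's own statement) =====
-- stated objective: alternative
-- what changed: Instead of looping over the 20 trigger phrases and running a substring search for each, B lowercases once and makes a single left-to-right scan of the text, testing at each position only the triggers selected by a first-character dict and a startswith check.
import Mathlib
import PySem

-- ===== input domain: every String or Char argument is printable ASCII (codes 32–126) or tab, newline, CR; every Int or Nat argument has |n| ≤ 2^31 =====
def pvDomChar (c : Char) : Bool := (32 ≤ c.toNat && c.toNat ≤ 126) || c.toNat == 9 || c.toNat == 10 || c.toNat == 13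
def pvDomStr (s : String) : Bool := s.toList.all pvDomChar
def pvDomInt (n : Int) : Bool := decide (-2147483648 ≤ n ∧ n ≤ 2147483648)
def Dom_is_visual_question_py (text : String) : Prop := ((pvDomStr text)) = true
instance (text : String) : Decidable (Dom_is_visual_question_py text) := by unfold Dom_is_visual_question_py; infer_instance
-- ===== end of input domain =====

-- B replaces the per-trigger substring loop by one left-to-right scan of the lowered text,
-- testing at each position only the triggers indexed (in a dict) by their first character
-- (objective: alternative — single pass with first-character dispatch; same observable behaviour).

-- ===== PORT A =====
def visualTriggers : List String :=
  ["where is", "where are", "where's", "can you see",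
   "do you see", "what am i wearing", "what is he wearing",
   "what is she wearing", "what color", "how many people",
   "what's on the", "look at", "show me", "find the",
   "what does", "look like", "what's in", "is there a",
   "what am i holding", "what am i doing"]

def is_visual_question_py (text : String) : Bool :=
  let lower := PySem.Str.lower text
  visualTriggers.any (fun trigger => PySem.Str.isIn trigger lower)

-- ===== PORT B =====
-- module-level dict _VISUAL_TRIGGERS_BY_FIRST from Source B (trigger lists as lists of chars;
-- the bucket lists are named here only for readability)
def bucketW : List (List Char) :=
  ["where is".toList, "where are".toList, "where's".toList,
   "what am i wearing".toList, "what is he wearing".toList,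
   "what is she wearing".toList, "what color".toList,
   "what's on the".toList, "what does".toList, "what's in".toList,
   "what am i holding".toList, "what am i doing".toList]
def bucketC : List (List Char) := ["can you see".toList]
def bucketD : List (List Char) := ["do you see".toList]
def bucketH : List (List Char) := ["how many people".toList]
def bucketL : List (List Char) := ["look at".toList, "look like".toList]
def bucketS : List (List Char) := ["show me".toList]
def bucketF : List (List Char) := ["find the".toList]
def bucketI : List (List Char) := ["is there a".toList]

def visualTriggersByFirst : PySem.Dict Char (List (List Char)) :=
  PySem.Dict.ofList
    [('w', bucketW), ('c', bucketC), ('d', bucketD), ('h', bucketH),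
     ('l', bucketL), ('s', bucketS), ('f', bucketF), ('i', bucketI)]

-- the 'for i in range(len(lower))' loop of Source B as structural recursion on the suffix
-- starting at i: lower[i] is the head c, and lower.startswith(trigger, i) is
-- PySem.Chars.startswith applied to that suffix.
def visualScan : List Char → Bool
  | [] => false
  | c :: rest =>
      ((visualTriggersByFirst.getD c []).any
        (fun trigger => PySem.Chars.startswith (c :: rest) trigger)) || visualScan rest

def is_visual_question_py_alt (text : String) : Bool :=
  let lower := PySem.Str.lower text
  visualScan lower.toList

-- ===== PRECONDITION & SPEC =====
def Spec_is_visual_question_py (text : String) (out : Bool) : Prop := out = is_visual_question_py_alt text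
instance (text : String) (out : Bool) : Decidable (Spec_is_visual_question_py text out) := by unfold Spec_is_visual_question_py; infer_instance

-- ===== CLAIM (what is proved, stated in full; the proofs are below) =====
def Claim_equal_is_visual_question_py : Prop := ∀ (text : String), Dom_is_visual_question_py text → Spec_is_visual_question_py text (is_visual_question_py text)

-- ===== LEMMAS AND PROOFS =====

-- the triggers of A, as char lists (proof-side helper)
def triggersL : List (List Char) := visualTriggers.map String.toList

-- dispatching on the first character loses nothing: the bucket for c decides
-- "some trigger starts here" exactly like the full list does.
theorem bucket_any_eq (c : Char) (rest : List Char) :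
    ((visualTriggersByFirst.getD c []).any
        (fun trigger => PySem.Chars.startswith (c :: rest) trigger))
      = triggersL.any (fun t => PySem.Chars.startswith (c :: rest) t) := by
  by_cases hw : c = 'w'
  · subst hw
    rw [show visualTriggersByFirst.getD 'w' [] = bucketW from by decide]
    simp [bucketW, triggersL, visualTriggers, PySem.Chars.startswith, List.isPrefixOf]
  by_cases hc : c = 'c'
  · subst hc
    rw [show visualTriggersByFirst.getD 'c' [] = bucketC from by decide]
    simp [bucketC, triggersL, visualTriggers, PySem.Chars.startswith, List.isPrefixOf]
  by_cases hd : c = 'd'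
  · subst hd
    rw [show visualTriggersByFirst.getD 'd' [] = bucketD from by decide]
    simp [bucketD, triggersL, visualTriggers, PySem.Chars.startswith, List.isPrefixOf]
  by_cases hh : c = 'h'
  · subst hh
    rw [show visualTriggersByFirst.getD 'h' [] = bucketH from by decide]
    simp [bucketH, triggersL, visualTriggers, PySem.Chars.startswith, List.isPrefixOf]
  by_cases hl : c = 'l'
  · subst hl
    rw [show visualTriggersByFirst.getD 'l' [] = bucketL from by decide]
    simp [bucketL, triggersL, visualTriggers, PySem.Chars.startswith, List.isPrefixOf]
  by_cases hs : c = 's'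
  · subst hs
    rw [show visualTriggersByFirst.getD 's' [] = bucketS from by decide]
    simp [bucketS, triggersL, visualTriggers, PySem.Chars.startswith, List.isPrefixOf]
  by_cases hf : c = 'f'
  · subst hf
    rw [show visualTriggersByFirst.getD 'f' [] = bucketF from by decide]
    simp [bucketF, triggersL, visualTriggers, PySem.Chars.startswith, List.isPrefixOf]
  by_cases hi : c = 'i'
  · subst hi
    rw [show visualTriggersByFirst.getD 'i' [] = bucketI from by decide]
    simp [bucketI, triggersL, visualTriggers, PySem.Chars.startswith, List.isPrefixOf]
  -- c matches no bucket key: the bucket is empty, and no trigger starts with c either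
  have hnone : visualTriggersByFirst.get? c = none := by
    rw [PySem.Dict.get?_eq_none_iff_not_mem_keys,
        show visualTriggersByFirst.keys = ['w','c','d','h','l','s','f','i'] from by decide]
    simp [hw, hc, hd, hh, hl, hs, hf, hi]
  rw [PySem.Dict.getD_eq_get?_getD, hnone]
  simp [triggersL, visualTriggers, PySem.Chars.startswith, List.isPrefixOf, Ne.symm hw, Ne.symm hc, Ne.symm hd, Ne.symm hh,
        Ne.symm hl, Ne.symm hs, Ne.symm hf, Ne.symm hi]

theorem visualScan_eq (l : List Char) :
    visualScan l = triggersL.any (fun t => PySem.Chars.isIn t l) := by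
  induction l with
  | nil => decide
  | cons c rest ih =>
      rw [visualScan, bucket_any_eq, ih]
      rcases h : triggersL.any (fun t => PySem.Chars.startswith (c :: rest) t) with _ | _
      · simp only [Bool.false_or]
        rcases h2 : triggersL.any (fun t => PySem.Chars.isIn t rest) with _ | _
        · symm
          simp only [List.any_eq_false] at h h2 ⊢
          intro t ht
          rw [Bool.not_eq_true, PySem.Chars.isIn_eq_false_iff]
          intro hinf
          rcases List.infix_cons_iff.mp hinf with hpre | hinf'
          · exact absurd ((PySem.Chars.startswith_iff _ _).mpr hpre) (by simpa using h t ht)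
          · exact absurd ((PySem.Chars.isIn_iff_infix _ _).mpr hinf') (by simpa using h2 t ht)
        · symm
          simp only [List.any_eq_true] at h2 ⊢
          obtain ⟨t, ht, hin⟩ := h2
          exact ⟨t, ht, (PySem.Chars.isIn_iff_infix _ _).mpr
            (List.infix_cons_iff.mpr (Or.inr ((PySem.Chars.isIn_iff_infix _ _).mp hin)))⟩
      · simp only [Bool.true_or]
        symm
        simp only [List.any_eq_true] at h ⊢
        obtain ⟨t, ht, hsw⟩ := h
        exact ⟨t, ht, (PySem.Chars.isIn_iff_infix _ _).mpr
          (List.infix_cons_iff.mpr (Or.inl ((PySem.Chars.startswith_iff _ _).mp hsw)))⟩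

-- ===== VERDICT (by name: the statement is the Claim_ definition above) =====
theorem is_visual_question_py_spec : Claim_equal_is_visual_question_py := by
  intro text _
  unfold Spec_is_visual_question_py is_visual_question_py is_visual_question_py_alt
  rw [visualScan_eq]
  simp [triggersL, List.any_map, Function.comp_def, PySem.Str.isIn_eq]
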